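-- pv_equiv track=rewrite | github.com/ViperEkura/KHAOSZ-dataset | sft_chinese_instruct.py | replace_seg
-- ===== SOURCE A (Python) =====
-- def replace_seg(query:str, response:str) -> str:
--     replacements = {
--         "\\[": "$$", "\\]": "$$",
--         "\\(": "$", "\\)": "$"
--     }
--     for old, new in replacements.items():
--         query = query.replace(old, new)
--         response = response.replace(old, new)
--
--     return query, response
-- ===== SOURCE B (Python) =====
-- def replace_seg(query, response):
--     repl = {'[': '$$', ']': '$$', '(': '$', ')': '$'}
--
--     def sub(s):
--         out = []
--         i = 0
--         n = len(s)
--         while i < n: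
--             if s[i] == '\\' and i + 1 < n and s[i + 1] in repl:
--                 out.append(repl[s[i + 1]])
--                 i += 2
--             else:
--                 out.append(s[i])
--                 i += 1
--         return ''.join(out)
--
--     return sub(query), sub(response)
-- ===== Notes on version B (the rewrite author's own statement) =====
-- stated objective: alternative
-- what changed: Replaces A's four sequential whole-string str.replace passes with a single left-to-right scan per string that consumes a backslash-delimiter pair via a lookup table ('['/']' -> '$$', '('/')' -> '$') and copies every other character.
import Mathlib
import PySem

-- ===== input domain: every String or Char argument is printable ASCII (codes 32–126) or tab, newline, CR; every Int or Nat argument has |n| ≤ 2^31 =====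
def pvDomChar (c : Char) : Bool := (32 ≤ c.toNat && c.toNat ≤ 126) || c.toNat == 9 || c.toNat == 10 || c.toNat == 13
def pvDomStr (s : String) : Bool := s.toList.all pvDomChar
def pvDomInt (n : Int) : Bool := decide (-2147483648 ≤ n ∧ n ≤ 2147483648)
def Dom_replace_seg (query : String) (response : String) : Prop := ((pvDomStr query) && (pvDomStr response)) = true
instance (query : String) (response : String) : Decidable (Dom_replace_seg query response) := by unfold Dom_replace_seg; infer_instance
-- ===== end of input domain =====

-- B replaces A's four sequential whole-string .replace passes by one left-to-right scan with a
-- lookup table (objective: alternative; one pass per string instead of four passes).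

-- ===== PORT A =====
-- A iterates over the dict's items in insertion order, replacing in query and response.
def replace_seg (query : String) (response : String) : String × String :=
  let replacements : List (String × String) :=
    [("\\[", "$$"), ("\\]", "$$"), ("\\(", "$"), ("\\)", "$")]
  let p := replacements.foldl
    (fun (qr : String × String) (kv : String × String) =>
      (PySem.Str.replace qr.1 kv.1 kv.2, PySem.Str.replace qr.2 kv.1 kv.2))
    (query, response)
  (p.1, p.2)

-- ===== PORT B =====
-- the lookup table repl of Source B: '[' and ']' ↦ "$$", '(' and ')' ↦ "$", other chars absent
def pvRepl (c : Char) : Option (List Char) :=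
  if c = '[' then some ['$', '$']
  else if c = ']' then some ['$', '$']
  else if c = '(' then some ['$']
  else if c = ')' then some ['$']
  else none

-- the while-loop of Source B's sub: consume "\x" with x in the table, else copy one char
def pvScan : List Char → List Char
  | [] => []
  | [c] => [c]
  | c :: d :: u =>
    match (if c = '\\' then pvRepl d else none) with
    | some r => r ++ pvScan u
    | none => c :: pvScan (d :: u)

def replace_seg_alt (query : String) (response : String) : String × String :=
  (String.ofList (pvScan query.toList), String.ofList (pvScan response.toList))

-- ===== PRECONDITION & SPEC =====
def Spec_replace_seg (query : String) (response : String) (out : String × String) : Prop := out = replace_seg_alt query response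
instance (query : String) (response : String) (out : String × String) : Decidable (Spec_replace_seg query response out) := by unfold Spec_replace_seg; infer_instance

-- ===== CLAIM (what is proved, stated in full; the proofs are below) =====
def Claim_equal_replace_seg : Prop := ∀ (query : String) (response : String), Dom_replace_seg query response → Spec_replace_seg query response (replace_seg query response)

-- ===== LEMMAS AND PROOFS =====

-- clean recursion computing Python's s.replace("\x", new) for the two-char pattern '\' x
def rep2 (x : Char) (new : List Char) : List Char → List Char
  | [] => []
  | [c] => [c]
  | c :: d :: u =>
    if c = '\\' ∧ d = x then new ++ rep2 x new u else c :: rep2 x new (d :: u)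

lemma go_eq (x : Char) (new : List Char) :
    ∀ fuel l acc, l.length ≤ fuel →
      PySem.Chars.replace.go ['\\', x] new fuel l acc = acc.reverse ++ rep2 x new l := by
  intro fuel
  induction fuel with
  | zero =>
    intro l acc h
    have hl : l = [] := by cases l <;> simp_all
    subst hl
    rw [PySem.Chars.replace.go]
    simp [rep2]
  | succ n ih =>
    intro l acc h
    match l with
    | [] =>
      rw [PySem.Chars.replace.go]
      all_goals first | omega | simp [rep2]
    | [c] =>
      rw [PySem.Chars.replace.go]
      have hpre : List.isPrefixOf ['\\', x] [c] = false := by simp [List.isPrefixOf]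
      rw [hpre, if_neg (show ¬(false = true) by simp), ih [] (c :: acc) (by simp)]
      simp [rep2]
    | c :: d :: u =>
      rw [PySem.Chars.replace.go]
      by_cases hc : c = '\\' ∧ d = x
      · have hpre : List.isPrefixOf ['\\', x] (c :: d :: u) = true := by
          simp [List.isPrefixOf, hc.1, hc.2]
        rw [hpre, if_pos rfl]
        have hd : List.drop (['\\', x] : List Char).length (c :: d :: u) = u := rfl
        rw [hd, ih u (new.reverse ++ acc) (by simp at h ⊢; omega)]
        obtain ⟨rfl, rfl⟩ := hc
        simp [rep2]
      · have hpre : List.isPrefixOf ['\\', x] (c :: d :: u) = false := by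
          simp [List.isPrefixOf]
          intro h1 h2
          exact hc ⟨h1.symm, h2.symm⟩
        rw [hpre, if_neg (show ¬(false = true) by simp),
            ih (d :: u) (c :: acc) (by simp at h ⊢; omega)]
        simp [rep2, hc]

lemma replace_eq (x : Char) (new s : List Char) :
    PySem.Chars.replace s ['\\', x] new = rep2 x new s := by
  rw [PySem.Chars.replace]
  rw [if_neg (by simp)]
  simpa using go_eq x new s.length s [] le_rfl

-- a non-backslash head passes through every rep2
lemma rep2_cons_ne (x : Char) (new : List Char) (c : Char) (t : List Char) (h : c ≠ '\\') :
    rep2 x new (c :: t) = c :: rep2 x new t := by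
  cases t with
  | nil => simp [rep2]
  | cons d u => simp [rep2, h]

-- a backslash followed by a char other than x passes through rep2 x
lemma rep2_bs_ne (x : Char) (new : List Char) (d : Char) (u : List Char) (h : d ≠ x) :
    rep2 x new ('\\' :: d :: u) = '\\' :: rep2 x new (d :: u) := by
  simp [rep2, h]

-- "starts with a char that is not one of the four bracket chars"
def pvOk (L : List Char) : Prop :=
  ∃ e v, L = e :: v ∧ e ≠ '[' ∧ e ≠ ']' ∧ e ≠ '(' ∧ e ≠ ')'

lemma pv_ok_step (x : Char) (nt : List Char) (L : List Char) (h : pvOk L) :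
    pvOk (rep2 x ('$' :: nt) L) := by
  obtain ⟨e, v, rfl, he1, he2, he3, he4⟩ := h
  by_cases hb : e = '\\'
  · subst hb
    cases v with
    | nil => exact ⟨'\\', [], by simp [rep2], by decide, by decide, by decide, by decide⟩
    | cons c w =>
      by_cases hcx : c = x
      · subst hcx
        refine ⟨'$', nt ++ rep2 c ('$' :: nt) w, by simp [rep2], ?_, ?_, ?_, ?_⟩ <;> decide
      · rw [rep2_bs_ne x ('$' :: nt) c w hcx]
        exact ⟨'\\', _, rfl, by decide, by decide, by decide, by decide⟩
  · rw [rep2_cons_ne x ('$' :: nt) e v hb]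
    exact ⟨e, _, rfl, he1, he2, he3, he4⟩

lemma pv_pass (x : Char) (new : List Char) (L : List Char) (h : pvOk L)
    (hx : x = '[' ∨ x = ']' ∨ x = '(' ∨ x = ')') :
    rep2 x new ('\\' :: L) = '\\' :: rep2 x new L := by
  obtain ⟨e, v, rfl, he1, he2, he3, he4⟩ := h
  refine rep2_bs_ne x new e v ?_
  rcases hx with rfl | rfl | rfl | rfl <;> assumption

-- the four sequential passes equal the single scan
lemma comp (n : Nat) : ∀ s : List Char, s.length ≤ n →
    rep2 ')' ['$'] (rep2 '(' ['$'] (rep2 ']' ['$', '$'] (rep2 '[' ['$', '$'] s))) = pvScan s := by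
  induction n with
  | zero =>
    intro s h
    have : s = [] := by cases s <;> simp_all
    subst this
    rfl
  | succ n ih =>
    intro s h
    match s with
    | [] => rfl
    | [c] => simp [rep2, pvScan]
    | c :: d :: u =>
      by_cases hc : c = '\\'
      · subst hc
        by_cases h1 : d = '['
        · subst h1
          rw [show rep2 '[' ['$', '$'] ('\\' :: '[' :: u) = '$' :: '$' :: rep2 '[' ['$', '$'] u from by simp [rep2]]
          rw [rep2_cons_ne ']' _ '$' _ (by decide), rep2_cons_ne ']' _ '$' _ (by decide),
              rep2_cons_ne '(' _ '$' _ (by decide), rep2_cons_ne '(' _ '$' _ (by decide),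
              rep2_cons_ne ')' _ '$' _ (by decide), rep2_cons_ne ')' _ '$' _ (by decide)]
          rw [ih u (by simp at h; omega)]
          simp [pvScan, pvRepl]
        · by_cases h2 : d = ']'
          · subst h2
            rw [rep2_bs_ne '[' _ ']' u (by decide), rep2_cons_ne '[' _ ']' u (by decide)]
            rw [show rep2 ']' ['$', '$'] ('\\' :: ']' :: rep2 '[' ['$', '$'] u)
                  = '$' :: '$' :: rep2 ']' ['$', '$'] (rep2 '[' ['$', '$'] u) from by simp [rep2]]
            rw [rep2_cons_ne '(' _ '$' _ (by decide), rep2_cons_ne '(' _ '$' _ (by decide),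
                rep2_cons_ne ')' _ '$' _ (by decide), rep2_cons_ne ')' _ '$' _ (by decide)]
            rw [ih u (by simp at h; omega)]
            simp [pvScan, pvRepl]
          · by_cases h3 : d = '('
            · subst h3
              rw [rep2_bs_ne '[' _ '(' u (by decide), rep2_cons_ne '[' _ '(' u (by decide),
                  rep2_bs_ne ']' _ '(' _ (by decide), rep2_cons_ne ']' _ '(' _ (by decide)]
              rw [show rep2 '(' ['$'] ('\\' :: '(' :: rep2 ']' ['$', '$'] (rep2 '[' ['$', '$'] u))
                    = '$' :: rep2 '(' ['$'] (rep2 ']' ['$', '$'] (rep2 '[' ['$', '$'] u)) from by simp [rep2]]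
              rw [rep2_cons_ne ')' _ '$' _ (by decide)]
              rw [ih u (by simp at h; omega)]
              simp [pvScan, pvRepl]
            · by_cases h4 : d = ')'
              · subst h4
                rw [rep2_bs_ne '[' _ ')' u (by decide), rep2_cons_ne '[' _ ')' u (by decide),
                    rep2_bs_ne ']' _ ')' _ (by decide), rep2_cons_ne ']' _ ')' _ (by decide),
                    rep2_bs_ne '(' _ ')' _ (by decide), rep2_cons_ne '(' _ ')' _ (by decide)]
                rw [show rep2 ')' ['$'] ('\\' :: ')' :: rep2 '(' ['$'] (rep2 ']' ['$', '$'] (rep2 '[' ['$', '$'] u)))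
                      = '$' :: rep2 ')' ['$'] (rep2 '(' ['$'] (rep2 ']' ['$', '$'] (rep2 '[' ['$', '$'] u))) from by simp [rep2]]
                rw [ih u (by simp at h; omega)]
                simp [pvScan, pvRepl]
              · -- '\' followed by a char matching no pattern: every pass keeps the backslash
                have h0 : pvOk (d :: u) := ⟨d, u, rfl, h1, h2, h3, h4⟩
                rw [rep2_bs_ne '[' ['$', '$'] d u h1]
                rw [pv_pass ']' ['$', '$'] _ (pv_ok_step '[' ['$'] _ h0) (Or.inr (Or.inl rfl))]
                rw [pv_pass '(' ['$'] _ (pv_ok_step ']' ['$'] _ (pv_ok_step '[' ['$'] _ h0))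
                      (Or.inr (Or.inr (Or.inl rfl)))]
                rw [pv_pass ')' ['$'] _
                      (pv_ok_step '(' [] _ (pv_ok_step ']' ['$'] _ (pv_ok_step '[' ['$'] _ h0)))
                      (Or.inr (Or.inr (Or.inr rfl)))]
                rw [ih (d :: u) (by simp at h ⊢; omega)]
                simp [pvScan, pvRepl, h1, h2, h3, h4]
      · rw [rep2_cons_ne '[' _ c _ hc, rep2_cons_ne ']' _ c _ hc,
            rep2_cons_ne '(' _ c _ hc, rep2_cons_ne ')' _ c _ hc]
        rw [ih (d :: u) (by simp at h ⊢; omega)]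
        simp [pvScan, hc]

lemma chain_eq (s : String) :
    PySem.Str.replace (PySem.Str.replace (PySem.Str.replace (PySem.Str.replace s "\\[" "$$") "\\]" "$$") "\\(" "$") "\\)" "$"
      = String.ofList (pvScan s.toList) := by
  have hl :
      (PySem.Str.replace (PySem.Str.replace (PySem.Str.replace (PySem.Str.replace s "\\[" "$$") "\\]" "$$") "\\(" "$") "\\)" "$").toList
        = pvScan s.toList := by
    simp only [PySem.Str.toList_replace]
    rw [show ("\\[" : String).toList = ['\\', '['] from rfl,
        show ("\\]" : String).toList = ['\\', ']'] from rfl,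
        show ("\\(" : String).toList = ['\\', '('] from rfl,
        show ("\\)" : String).toList = ['\\', ')'] from rfl,
        show ("$$" : String).toList = ['$', '$'] from rfl,
        show ("$" : String).toList = ['$'] from rfl]
    rw [replace_eq, replace_eq, replace_eq, replace_eq]
    exact comp s.toList.length s.toList le_rfl
  rw [← hl, String.ofList_toList]

-- ===== VERDICT (by name: the statement is the Claim_ definition above) =====
theorem replace_seg_spec : Claim_equal_replace_seg := by
  intro query response _
  unfold Spec_replace_seg replace_seg replace_seg_alt
  simp only [List.foldl]
  exact Prod.ext (chain_eq query) (chain_eq response)
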